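-- pv_equiv track=rewrite | github.com/sheelumails19/pythonBasicPrograms | LowercaseFirstThenUpperCase.py | arrange_characters
-- ===== SOURCE A (Python) =====
-- def arrange_characters(s):
--     # Initialize empty strings for lowercase and uppercase letters
--     lowercase = ""
--     uppercase = ""
--
--     # Separate the characters of the string based on their case
--     for char in s:
--         if char.islower():
--             lowercase += char
--         else:
--             uppercase += char
--
--     # Concatenate the two strings to get the desired order
--     arranged_str = lowercase + uppercase
--
--     return arranged_str
-- ===== SOURCE B (Python) =====
-- def arrange_characters(s):
--     # Stable sort on a boolean key: lowercase (False) first, others (True) after,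
--     # each group in original order -- same result as the two-accumulator loop.
--     return "".join(sorted(s, key=lambda c: not c.islower()))
-- ===== Notes on version B (the rewrite author's own statement) =====
-- stated objective: idiomatic
-- what changed: Replaced the explicit two-accumulator partition loop with a single stable sort on a boolean is-not-lowercase key, delegating all control flow to sorted and join.
import Mathlib
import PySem

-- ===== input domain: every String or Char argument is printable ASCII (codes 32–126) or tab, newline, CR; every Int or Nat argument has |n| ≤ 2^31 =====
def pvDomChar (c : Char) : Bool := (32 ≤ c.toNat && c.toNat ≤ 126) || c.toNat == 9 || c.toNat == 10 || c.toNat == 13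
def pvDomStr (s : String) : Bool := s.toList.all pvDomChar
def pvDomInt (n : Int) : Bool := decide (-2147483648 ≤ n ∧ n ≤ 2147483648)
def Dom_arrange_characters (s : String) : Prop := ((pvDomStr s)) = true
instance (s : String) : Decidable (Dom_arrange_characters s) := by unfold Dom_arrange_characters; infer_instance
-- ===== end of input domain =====

-- B replaces A's two-accumulator partition loop by one stable sort on a boolean key (idiomatic; not faster).

-- ===== PORT A =====
-- loop over the characters, appending each to the lowercase or the uppercase accumulator, then concatenate
def arrange_characters (s : String) : String :=
  let r := s.toList.foldl
    (fun (acc : List Char × List Char) c =>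
      if PySem.Chars.islower c then (acc.1 ++ [c], acc.2) else (acc.1, acc.2 ++ [c]))
    ([], [])
  String.ofList (r.1 ++ r.2)

-- ===== PORT B =====
-- "".join(sorted(s, key=lambda c: not c.islower())); the Bool key False/True is ported as Nat 0/1 (same order)
def arrange_characters_alt (s : String) : String :=
  String.ofList (PySem.List.sorted s.toList (fun c => if PySem.Chars.islower c then (0 : Nat) else 1) false)

-- ===== PRECONDITION & SPEC =====
def Spec_arrange_characters (s : String) (out : String) : Prop := out = arrange_characters_alt s
instance (s : String) (out : String) : Decidable (Spec_arrange_characters s out) := by unfold Spec_arrange_characters; infer_instance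

-- ===== CLAIM (what is proved, stated in full; the proofs are below) =====
def Claim_equal_arrange_characters : Prop := ∀ (s : String), Dom_arrange_characters s → Spec_arrange_characters s (arrange_characters s)

-- ===== LEMMAS AND PROOFS =====

-- A's loop computes the two filters
theorem foldA_eq_filter (l a b : List Char) :
    l.foldl
      (fun (acc : List Char × List Char) c =>
        if PySem.Chars.islower c then (acc.1 ++ [c], acc.2) else (acc.1, acc.2 ++ [c]))
      (a, b)
    = (a ++ l.filter (fun c => PySem.Chars.islower c),
       b ++ l.filter (fun c => !PySem.Chars.islower c)) := by
  induction l generalizing a b with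
  | nil => simp
  | cons x t ih =>
    by_cases hx : PySem.Chars.islower x = true <;>
      simp [hx, ih, List.append_assoc]

-- inserting x before exactly the elements of B places it between A and B
theorem insertBy_middle (before : Char → Char → Bool) (x : Char) (A B : List Char)
    (hA : ∀ a ∈ A, before x a = false) (hB : ∀ b ∈ B, before x b = true) :
    PySem.List.insertBy before x (A ++ B) = A ++ x :: B := by
  induction A with
  | nil =>
    cases B with
    | nil => simp [PySem.List.insertBy]
    | cons y t => simp [PySem.List.insertBy, hB y (by simp)]
  | cons a t ih =>
    have h1 : before x a = false := hA a (by simp)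
    simp [PySem.List.insertBy, h1,
      ih (fun a' ha' => hA a' (List.mem_cons_of_mem _ ha'))]

-- the stable sort on the 0/1 key is the partition: the lowercase block, then the rest
theorem sorted_bool_key_eq_partition (l : List Char) :
    PySem.List.sorted l (fun c => if PySem.Chars.islower c then (0 : Nat) else 1) false
    = l.filter (fun c => PySem.Chars.islower c) ++ l.filter (fun c => !PySem.Chars.islower c) := by
  rw [PySem.List.sorted_eq_foldl_insertBy]
  suffices H : ∀ (l A B : List Char),
      (∀ a ∈ A, PySem.Chars.islower a = true) → (∀ b ∈ B, PySem.Chars.islower b = false) →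
      l.foldl
        (fun acc x =>
          PySem.List.insertBy
            (fun a b =>
              decide ((if PySem.Chars.islower a then (0 : Nat) else 1)
                < (if PySem.Chars.islower b then (0 : Nat) else 1))) x acc)
        (A ++ B)
      = (A ++ l.filter (fun c => PySem.Chars.islower c))
        ++ (B ++ l.filter (fun c => !PySem.Chars.islower c)) by
    simpa using H l [] [] (by simp) (by simp)
  intro l
  induction l with
  | nil => intro A B _ _; simp
  | cons x t ih =>
    intro A B hA hB
    by_cases hx : PySem.Chars.islower x = true
    · have hstep :
          PySem.List.insertBy
            (fun a b =>
              decide ((if PySem.Chars.islower a then (0 : Nat) else 1)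
                < (if PySem.Chars.islower b then (0 : Nat) else 1))) x (A ++ B)
          = (A ++ [x]) ++ B := by
        have h1 : ∀ a ∈ A, (decide ((if PySem.Chars.islower x then (0 : Nat) else 1)
            < (if PySem.Chars.islower a then (0 : Nat) else 1))) = false := by
          intro a ha; simp [hx, hA a ha]
        have h2 : ∀ b ∈ B, (decide ((if PySem.Chars.islower x then (0 : Nat) else 1)
            < (if PySem.Chars.islower b then (0 : Nat) else 1))) = true := by
          intro b hb; simp [hx, hB b hb]
        rw [insertBy_middle _ _ A B h1 h2]
        simp
      have hA' : ∀ a ∈ A ++ [x], PySem.Chars.islower a = true := by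
        intro a ha
        rcases List.mem_append.mp ha with h | h
        · exact hA a h
        · simp at h; subst h; exact hx
      rw [List.foldl_cons]
      rw [hstep]
      rw [ih (A ++ [x]) B hA' hB]
      simp [hx, List.append_assoc]
    · have hstep :
          PySem.List.insertBy
            (fun a b =>
              decide ((if PySem.Chars.islower a then (0 : Nat) else 1)
                < (if PySem.Chars.islower b then (0 : Nat) else 1))) x (A ++ B)
          = A ++ (B ++ [x]) := by
        have h1 : ∀ a ∈ A ++ B, (decide ((if PySem.Chars.islower x then (0 : Nat) else 1)
            < (if PySem.Chars.islower a then (0 : Nat) else 1))) = false := by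
          intro a ha
          rcases List.mem_append.mp ha with h | h
          · simp [hx, hA a h]
          · simp [hx, hB a h]
        have := insertBy_middle
            (fun a b =>
              decide ((if PySem.Chars.islower a then (0 : Nat) else 1)
                < (if PySem.Chars.islower b then (0 : Nat) else 1)))
            x (A ++ B) [] h1 (by simp)
        simpa [List.append_assoc] using this
      have hB' : ∀ b ∈ B ++ [x], PySem.Chars.islower b = false := by
        intro b hb
        rcases List.mem_append.mp hb with h | h
        · exact hB b h
        · simp at h; subst h; simpa using hx
      rw [List.foldl_cons]
      rw [hstep]
      rw [ih A (B ++ [x]) hA hB']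
      simp [hx, List.append_assoc]

-- ===== VERDICT (by name: the statement is the Claim_ definition above) =====
theorem arrange_characters_spec : Claim_equal_arrange_characters := by
  intro s _
  unfold Spec_arrange_characters arrange_characters arrange_characters_alt
  rw [sorted_bool_key_eq_partition]
  simp [foldA_eq_filter]
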